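-- pv_equiv track=rewrite | github.com/defeo/towers | de_compose.py | compose
-- ===== SOURCE A (Python) =====
-- def compose(Ps, f, g=1):
--     "Compute the numerator of Ps(f/g). Ps is a list of coefficients."
--     n = len(Ps)
--
--     def color(i, n, h):
--         while h > 0:
--             if bool(i & 1) == bool(n & (1 << (h - 1))):
--                 return bool(i & 1)
--             i = i // 2
--             h -= 1
--         return False
--
--     res = []
--     ptr = 0
--     h = n.bit_length() - 1
--     for i in range(1 << h):
--         if color(i, n, h):
--             res.append(g*Ps[ptr] + f*Ps[ptr+1])
--             ptr += 2
--         else: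
--             res.append(Ps[ptr])
--             ptr += 1
--     Ps = res
--
--     ll, lh = 1, g
--     rl, rh = 1, f
--     for h in reversed(range(n.bit_length() - 1)):
--         if n & (1 << (h + 1)):
--             ll, lh = ll * lh, lh**2
--             rl, rh = rl * rh, rh**2
--         else:
--             ll, lh = ll**2, ll * lh
--             rl, rh = rl**2, rl * rh
--         res = []
--         b = n & (1 << h)
--         for i in range(1 << h):
--             col = color(i, n, h)
--             if col and b:
--                 res.append(lh*Ps[2*i] + rh*Ps[2*i+1])
--             elif col or b:
--                 res.append(lh*Ps[2*i] + rl*Ps[2*i+1])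
--             else:
--                 res.append(ll*Ps[2*i] + rl*Ps[2*i+1])
--         Ps = res
--
--     return Ps[0]
-- ===== SOURCE B (Python) =====
-- def compose(Ps, f, g=1):
--     "Compute the numerator of Ps(f/g). Ps is a list of coefficients."
--     acc = Ps[-1]
--     gp = 1
--     for c in reversed(Ps[:-1]):
--         gp *= g
--         acc = acc * f + c * gp
--     return acc
-- ===== Notes on version B (the rewrite author's own statement) =====
-- stated objective: simpler
-- what changed: Replaces A's bit-colored balanced-tree combination (a 'color' function over the bits of n, a pairing pass, and log n halving passes maintaining four power accumulators) by a single backward Horner pass computing sum Ps[k]*f^k*g^(n-1-k) directly.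
import Mathlib
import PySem

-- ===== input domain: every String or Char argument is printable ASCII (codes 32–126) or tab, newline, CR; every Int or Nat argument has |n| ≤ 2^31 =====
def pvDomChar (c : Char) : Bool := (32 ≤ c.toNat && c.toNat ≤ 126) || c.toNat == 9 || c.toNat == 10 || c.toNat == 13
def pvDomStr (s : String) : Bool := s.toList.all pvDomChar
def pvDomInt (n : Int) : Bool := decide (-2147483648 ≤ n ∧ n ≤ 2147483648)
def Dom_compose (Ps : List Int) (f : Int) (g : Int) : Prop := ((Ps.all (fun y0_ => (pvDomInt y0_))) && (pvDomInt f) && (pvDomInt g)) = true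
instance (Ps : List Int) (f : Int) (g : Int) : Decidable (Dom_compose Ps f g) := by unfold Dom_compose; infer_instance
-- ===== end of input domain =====

-- B replaces A's bit-colored balanced-tree combination by a single backward Horner pass (objective: simpler).

-- ===== PORT A =====
-- list indexing Ps[k] for a nonnegative in-range index (exact there; every index A uses is
-- in range for nonempty Ps, and the empty list, where Python raises, is excluded by Pre_compose)
def pyAt (l : List Int) (k : Nat) : Int := (l[k]?).getD 0

-- A's inner 'color' while-loop, step for step (recursion on h)
def colorA (i n : Nat) : Nat → Bool
  | 0 => false
  | h + 1 => if (i.testBit 0) = (n.testBit h) then i.testBit 0 else colorA (i / 2) n h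

-- body of A's first res-building loop (state: res, ptr)
def Astep1 (Ps : List Int) (f g : Int) (n H : Nat) (st : List Int × Nat) (i : Nat) : List Int × Nat :=
  if colorA i n H then (st.1 ++ [g * pyAt Ps st.2 + f * pyAt Ps (st.2 + 1)], st.2 + 2)
  else (st.1 ++ [pyAt Ps st.2], st.2 + 1)

-- body of A's second loop (state: Ps, ll, lh, rl, rh); the inner loop appends one entry per i
def Astep2 (f g : Int) (n : Nat) (s : List Int × Int × Int × Int × Int) (h : Nat) :
    List Int × Int × Int × Int × Int :=
  let P := s.1
  let q := if n.testBit (h + 1) then (s.2.1 * s.2.2.1, s.2.2.1 ^ 2, s.2.2.2.1 * s.2.2.2.2, s.2.2.2.2 ^ 2)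
           else (s.2.1 ^ 2, s.2.1 * s.2.2.1, s.2.2.2.1 ^ 2, s.2.2.2.1 * s.2.2.2.2)
  let P' := (List.range (2 ^ h)).foldl (fun r i =>
    r ++ [if colorA i n h && n.testBit h then q.2.1 * pyAt P (2 * i) + q.2.2.2 * pyAt P (2 * i + 1)
          else if colorA i n h || n.testBit h then q.2.1 * pyAt P (2 * i) + q.2.2.1 * pyAt P (2 * i + 1)
          else q.1 * pyAt P (2 * i) + q.2.2.1 * pyAt P (2 * i + 1)]) []
  (P', q)

-- literal transliteration of A (n.bit_length() = Nat.size n; truthiness of n & (1 << h) = testBit)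
def compose (Ps : List Int) (f : Int) (g : Int) : Int :=
  let n := Ps.length
  let H := n.size - 1
  let st := (List.range (2 ^ H)).foldl (Astep1 Ps f g n H) ([], 0)
  let fin := ((List.range H).reverse).foldl (Astep2 f g n) (st.1, 1, g, 1, f)
  pyAt fin.1 0

-- ===== PORT B =====
-- literal transliteration of Source B: acc = Ps[-1]; for c in reversed(Ps[:-1]): gp *= g; acc = acc*f + c*gp
def compose_alt (Ps : List Int) (f : Int) (g : Int) : Int :=
  let st := (Ps.dropLast.reverse).foldl
    (fun (s : Int × Int) c => (s.1 * f + c * (s.2 * g), s.2 * g))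
    (((PySem.List.pyGet? Ps (-1)).getD 0), 1)
  st.1

-- ===== PRECONDITION & SPEC =====
-- On Ps = [] both A (1 << -1: ValueError) and B (Ps[-1]: IndexError) raise; Pre_ excludes exactly that.
def Pre_compose (Ps : List Int) (f : Int) (g : Int) : Prop := Ps ≠ []
instance (Ps : List Int) (f : Int) (g : Int) : Decidable (Pre_compose Ps f g) := by unfold Pre_compose; infer_instance
def pvWitness_compose : List Int × Int × Int := ([1, -2, 3], 2, 5)

def Spec_compose (Ps : List Int) (f : Int) (g : Int) (out : Int) : Prop := out = compose_alt Ps f g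
instance (Ps : List Int) (f : Int) (g : Int) (out : Int) : Decidable (Spec_compose Ps f g out) := by unfold Spec_compose; infer_instance

-- ===== CLAIM (what is proved, stated in full; the proofs are below) =====
def Claim_equal_compose : Prop := ∀ (Ps : List Int) (f : Int) (g : Int), Dom_compose Ps f g → Pre_compose Ps f g → Spec_compose Ps f g (compose Ps f g)

-- ===== LEMMAS AND PROOFS =====

-- Common specification: Nval f g c = Σ c_k f^k g^(|c|-1-k), the numerator of c(f/g).
def Nval (f g : Int) : List Int → Int
  | [] => 0
  | c :: rest => c * g ^ rest.length + f * Nval f g rest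

-- number of original coefficients covered by tree node i at level h
def sizeL (n i h : Nat) : Nat := n / 2 ^ h + (if colorA i n h then 1 else 0)

-- offset (first coefficient) of node i at level h
def offL (n : Nat) (h : Nat) : Nat → Nat
  | 0 => 0
  | i + 1 => offL n h i + sizeL n i h

-- value of node i at level h: numerator of its coefficient slice
def valL (Ps : List Int) (f g : Int) (i h : Nat) : Int :=
  Nval f g ((Ps.drop (offL Ps.length h i)).take (sizeL Ps.length i h))

theorem colorA_even (i n h : Nat) : colorA (2 * i) n (h + 1) = (colorA i n h && n.testBit h) := by
  rcases Bool.eq_false_or_eq_true (n.testBit h) with hb | hb <;>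
    simp [colorA, hb, Nat.mul_div_cancel_left i (by norm_num : 0 < 2)]

theorem colorA_odd (i n h : Nat) : colorA (2 * i + 1) n (h + 1) = (colorA i n h || n.testBit h) := by
  rcases Bool.eq_false_or_eq_true (n.testBit h) with hb | hb <;>
    simp [colorA, hb, Nat.mul_add_div (by norm_num : 0 < 2)]

theorem div_pow_succ (n h : Nat) :
    n / 2 ^ h = 2 * (n / 2 ^ (h + 1)) + (if n.testBit h then 1 else 0) := by
  have h1 : n / 2 ^ h / 2 = n / 2 ^ (h + 1) := by
    rw [Nat.div_div_eq_div_mul, pow_succ]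
  have h2 : n.testBit h = decide (n / 2 ^ h % 2 = 1) := Nat.testBit_eq_decide_div_mod_eq
  rcases Bool.eq_false_or_eq_true (n.testBit h) with hb | hb <;> rw [hb] <;> simp <;>
    · rw [hb] at h2
      simp at h2
      omega

theorem size_pair (n i h : Nat) :
    sizeL n (2 * i) (h + 1) + sizeL n (2 * i + 1) (h + 1) = sizeL n i h := by
  have := div_pow_succ n h
  simp only [sizeL, colorA_even, colorA_odd]
  rcases Bool.eq_false_or_eq_true (colorA i n h) with hc | hc <;>
    rcases Bool.eq_false_or_eq_true (n.testBit h) with hb | hb <;>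
      simp [hc, hb] at this ⊢ <;> omega

theorem off_double (n h : Nat) (i : Nat) : offL n (h + 1) (2 * i) = offL n h i := by
  induction i with
  | zero => rfl
  | succ i ih =>
    have e : 2 * (i + 1) = (2 * i + 1) + 1 := by ring
    rw [e, offL, offL, offL, Nat.add_assoc, size_pair, ih]

theorem off_pow (n : Nat) (h : Nat) : offL n h (2 ^ h) = n := by
  induction h with
  | zero => simp [offL, sizeL, colorA]
  | succ h ih => rw [pow_succ, Nat.mul_comm, off_double, ih]

theorem off_mono (n h : Nat) {i j : Nat} (hij : i ≤ j) : offL n h i ≤ offL n h j := by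
  induction j with
  | zero => simp_all
  | succ j ih =>
    rcases Nat.lt_or_ge i (j + 1) with hl | hl
    · exact le_trans (ih (by omega)) (by rw [offL]; omega)
    · have : i = j + 1 := by omega
      simp [this]

theorem off_add_size_le (n h i : Nat) (hi : i < 2 ^ h) :
    offL n h i + sizeL n i h ≤ n := by
  have : offL n h (i + 1) ≤ offL n h (2 ^ h) := off_mono n h hi
  rw [off_pow] at this
  simpa [offL] using this

theorem Nval_append (f g : Int) (u v : List Int) :
    Nval f g (u ++ v) = g ^ v.length * Nval f g u + f ^ u.length * Nval f g v := by
  induction u with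
  | nil => simp [Nval]
  | cons a u ih =>
    simp only [List.cons_append, Nval, ih, List.length_append, List.length_cons]
    ring

theorem Nval_one (f g a : Int) : Nval f g [a] = a := by simp [Nval]

theorem Nval_two (f g a b : Int) : Nval f g [a, b] = a * g + f * b := by simp [Nval]

theorem slice_one (l : List Int) (o : Nat) (h : o < l.length) :
    (l.drop o).take 1 = [pyAt l o] := by
  rw [List.drop_eq_getElem_cons h, List.take_succ_cons, List.take_zero]
  rw [pyAt, List.getElem?_eq_getElem h]
  rfl

theorem slice_two (l : List Int) (o : Nat) (h : o + 2 ≤ l.length) :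
    (l.drop o).take 2 = [pyAt l o, pyAt l (o + 1)] := by
  rw [List.drop_eq_getElem_cons (show o < l.length by omega),
      List.drop_eq_getElem_cons (show o + 1 < l.length by omega),
      List.take_succ_cons, List.take_succ_cons, List.take_zero]
  rw [pyAt, pyAt, List.getElem?_eq_getElem (show o < l.length by omega),
      List.getElem?_eq_getElem (show o + 1 < l.length by omega)]
  rfl

-- splitting a node's value into its two children's values
theorem val_split (Ps : List Int) (f g : Int) (i h : Nat) (hi : i < 2 ^ h) :
    valL Ps f g i h =
      g ^ sizeL Ps.length (2 * i + 1) (h + 1) * valL Ps f g (2 * i) (h + 1) +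
      f ^ sizeL Ps.length (2 * i) (h + 1) * valL Ps f g (2 * i + 1) (h + 1) := by
  set n := Ps.length
  set o := offL n h i with ho
  set s := sizeL n (2 * i) (h + 1) with hs
  set t := sizeL n (2 * i + 1) (h + 1) with ht
  have hbound : o + s + t ≤ n := by
    have h2i : 2 * i + 1 < 2 ^ (h + 1) := by
      have := hi; rw [pow_succ] at *; omega
    have := off_add_size_le n (h + 1) (2 * i + 1) h2i
    rw [offL, off_double] at this
    omega
  have hlen1 : ((Ps.drop o).take s).length = s := by
    simp [List.length_take, List.length_drop]; omega
  have hlen2 : ((Ps.drop (o + s)).take t).length = t := by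
    simp [List.length_take, List.length_drop]; omega
  have hsplit : (Ps.drop o).take (s + t) = (Ps.drop o).take s ++ (Ps.drop (o + s)).take t := by
    rw [List.take_add, List.drop_drop]
  unfold valL
  rw [← ho, show sizeL n i h = s + t from (size_pair n i h).symm, hsplit, Nval_append,
      hlen1, hlen2, off_double, ← ho, show offL n (h + 1) (2 * i + 1) = o + s by
        rw [offL, off_double, ← ho, ← hs]]

-- folding an append-one-element body is mapping
theorem foldl_append_eq_map {α β : Type} (l : List α) (F : α → β) (acc : List β) :
    l.foldl (fun r x => r ++ [F x]) acc = acc ++ l.map F := by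
  induction l generalizing acc with
  | nil => simp
  | cons a l ih => simp [ih]

theorem pyAt_map_range (F : Nat → Int) (m k : Nat) (h : k < m) :
    pyAt ((List.range m).map F) k = F k := by
  simp [pyAt, h]

theorem divH_one (n : Nat) (hn : 1 ≤ n) : n / 2 ^ (n.size - 1) = 1 := by
  have hp : 0 < n.size := Nat.size_pos.mpr hn
  have h1 : 2 ^ (n.size - 1) ≤ n := Nat.lt_size.mp (by omega)
  have h3 : n < 2 ^ (n.size - 1) * 2 := by
    rw [← pow_succ, Nat.sub_add_cancel hp]; exact Nat.lt_size_self n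
  exact Nat.div_eq_of_lt_le (by omega) (by omega)

-- the first loop produces the level-H node values
theorem firstLoop (Ps : List Int) (f g : Int) (hne : Ps ≠ [])
    (m : Nat) (hm : m ≤ 2 ^ (Ps.length.size - 1)) :
    (List.range m).foldl (Astep1 Ps f g Ps.length (Ps.length.size - 1)) ([], 0) =
      ((List.range m).map (fun i => valL Ps f g i (Ps.length.size - 1)),
        offL Ps.length (Ps.length.size - 1) m) := by
  have hn1 : 1 ≤ Ps.length := List.length_pos_iff.mpr hne
  have hd1 := divH_one Ps.length hn1
  induction m with
  | zero => simp [offL]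
  | succ m ih =>
    have hmlt : m < 2 ^ (Ps.length.size - 1) := hm
    have hbd := off_add_size_le Ps.length (Ps.length.size - 1) m hmlt
    rw [List.range_succ, List.foldl_append, ih (le_of_lt hmlt), List.foldl_cons,
        List.foldl_nil, List.map_append, List.map_cons, List.map_nil]
    unfold Astep1
    rcases Bool.eq_false_or_eq_true (colorA m Ps.length (Ps.length.size - 1)) with hc | hc
    · have hsz : sizeL Ps.length m (Ps.length.size - 1) = 2 := by simp [sizeL, hc, hd1]
      rw [hsz] at hbd
      simp only [hc, if_true]
      refine Prod.ext ?_ ?_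
      · show _ ++ [g * pyAt Ps (offL Ps.length (Ps.length.size - 1) m) +
            f * pyAt Ps (offL Ps.length (Ps.length.size - 1) m + 1)] = _
        congr 1
        rw [valL, hsz, slice_two Ps _ (by omega), Nval_two]
        ring_nf
      · show offL Ps.length (Ps.length.size - 1) m + 2 = _
        rw [offL, hsz]
    · have hsz : sizeL Ps.length m (Ps.length.size - 1) = 1 := by simp [sizeL, hc, hd1]
      rw [hsz] at hbd
      simp only [hc, Bool.false_eq_true, if_false]
      refine Prod.ext ?_ ?_
      · show _ ++ [pyAt Ps (offL Ps.length (Ps.length.size - 1) m)] = _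
        congr 1
        rw [valL, hsz, slice_one Ps _ (by omega), Nval_one]
      · show offL Ps.length (Ps.length.size - 1) m + 1 = _
        rw [offL, hsz]

-- one combined entry at level h equals the level-h node value
theorem stepEntry (Ps : List Int) (f g : Int) (h i : Nat) (hi : i < 2 ^ h) :
    valL Ps f g i h =
      (if colorA i Ps.length h && Ps.length.testBit h then
        g ^ (Ps.length / 2 ^ (h + 1) + 1) *
          pyAt ((List.range (2 ^ (h + 1))).map (fun j => valL Ps f g j (h + 1))) (2 * i) +
        f ^ (Ps.length / 2 ^ (h + 1) + 1) *
          pyAt ((List.range (2 ^ (h + 1))).map (fun j => valL Ps f g j (h + 1))) (2 * i + 1)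
      else if colorA i Ps.length h || Ps.length.testBit h then
        g ^ (Ps.length / 2 ^ (h + 1) + 1) *
          pyAt ((List.range (2 ^ (h + 1))).map (fun j => valL Ps f g j (h + 1))) (2 * i) +
        f ^ (Ps.length / 2 ^ (h + 1)) *
          pyAt ((List.range (2 ^ (h + 1))).map (fun j => valL Ps f g j (h + 1))) (2 * i + 1)
      else
        g ^ (Ps.length / 2 ^ (h + 1)) *
          pyAt ((List.range (2 ^ (h + 1))).map (fun j => valL Ps f g j (h + 1))) (2 * i) +
        f ^ (Ps.length / 2 ^ (h + 1)) *
          pyAt ((List.range (2 ^ (h + 1))).map (fun j => valL Ps f g j (h + 1))) (2 * i + 1)) := by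
  have h2i : 2 * i < 2 ^ (h + 1) := by rw [pow_succ]; omega
  have h2i1 : 2 * i + 1 < 2 ^ (h + 1) := by rw [pow_succ]; omega
  rw [pyAt_map_range _ _ _ h2i, pyAt_map_range _ _ _ h2i1, val_split Ps f g i h hi]
  rcases Bool.eq_false_or_eq_true (colorA i Ps.length h) with hc | hc <;>
    rcases Bool.eq_false_or_eq_true (Ps.length.testBit h) with hb | hb <;>
      simp only [hc, hb, sizeL, colorA_even, colorA_odd] <;> simp [hc, hb]

-- one pass of the second loop turns level-(h+1) values into level-h values
theorem stepLoop (Ps : List Int) (f g : Int) (h : Nat) :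
    Astep2 f g Ps.length
      ((List.range (2 ^ (h + 1))).map (fun i => valL Ps f g i (h + 1)),
        g ^ (Ps.length / 2 ^ (h + 2)), g ^ (Ps.length / 2 ^ (h + 2) + 1),
        f ^ (Ps.length / 2 ^ (h + 2)), f ^ (Ps.length / 2 ^ (h + 2) + 1)) h =
      ((List.range (2 ^ h)).map (fun i => valL Ps f g i h),
        g ^ (Ps.length / 2 ^ (h + 1)), g ^ (Ps.length / 2 ^ (h + 1) + 1),
        f ^ (Ps.length / 2 ^ (h + 1)), f ^ (Ps.length / 2 ^ (h + 1) + 1)) := by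
  set n := Ps.length with hn
  have hdiv : n / 2 ^ (h + 1) = 2 * (n / 2 ^ (h + 2)) + (if n.testBit (h + 1) then 1 else 0) := by
    rw [show h + 2 = h + 1 + 1 by omega]; exact div_pow_succ n (h + 1)
  have e1 : g ^ (n / 2 ^ (h + 2)) * g ^ (n / 2 ^ (h + 2) + 1) =
      g ^ (2 * (n / 2 ^ (h + 2)) + 1) := by rw [← pow_add]; congr 1; omega
  have e2 : (g ^ (n / 2 ^ (h + 2) + 1)) ^ 2 = g ^ (2 * (n / 2 ^ (h + 2)) + 2) := by
    rw [← pow_mul]; congr 1; omega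
  have e3 : (g ^ (n / 2 ^ (h + 2))) ^ 2 = g ^ (2 * (n / 2 ^ (h + 2))) := by
    rw [← pow_mul]; congr 1; omega
  have e1f : f ^ (n / 2 ^ (h + 2)) * f ^ (n / 2 ^ (h + 2) + 1) =
      f ^ (2 * (n / 2 ^ (h + 2)) + 1) := by rw [← pow_add]; congr 1; omega
  have e2f : (f ^ (n / 2 ^ (h + 2) + 1)) ^ 2 = f ^ (2 * (n / 2 ^ (h + 2)) + 2) := by
    rw [← pow_mul]; congr 1; omega
  have e3f : (f ^ (n / 2 ^ (h + 2))) ^ 2 = f ^ (2 * (n / 2 ^ (h + 2))) := by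
    rw [← pow_mul]; congr 1; omega
  unfold Astep2
  rcases Bool.eq_false_or_eq_true (n.testBit (h + 1)) with hb2 | hb2 <;>
    simp only [hb2, if_true, Bool.false_eq_true, if_false] <;>
    simp only [hb2, if_true, Bool.false_eq_true, if_false] at hdiv
  · -- testBit (h+1) = true : n / 2^(h+1) = 2*(n/2^(h+2)) + 1
    rw [e1, e2, e1f, e2f, show 2 * (n / 2 ^ (h + 2)) + 1 = n / 2 ^ (h + 1) by omega,
        show 2 * (n / 2 ^ (h + 2)) + 2 = n / 2 ^ (h + 1) + 1 by omega]
    refine Prod.ext ?_ rfl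
    rw [foldl_append_eq_map, List.nil_append]
    apply List.map_congr_left
    intro i hi
    rw [List.mem_range] at hi
    exact (stepEntry Ps f g h i hi).symm
  · rw [e1, e3, e1f, e3f, show 2 * (n / 2 ^ (h + 2)) + 1 = n / 2 ^ (h + 1) + 1 by omega,
        show 2 * (n / 2 ^ (h + 2)) = n / 2 ^ (h + 1) by omega]
    refine Prod.ext ?_ rfl
    rw [foldl_append_eq_map, List.nil_append]
    apply List.map_congr_left
    intro i hi
    rw [List.mem_range] at hi
    exact (stepEntry Ps f g h i hi).symm

theorem mainLoop (Ps : List Int) (f g : Int) (k : Nat) :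
    (((List.range k).reverse).foldl (Astep2 f g Ps.length)
      ((List.range (2 ^ k)).map (fun i => valL Ps f g i k),
        g ^ (Ps.length / 2 ^ (k + 1)), g ^ (Ps.length / 2 ^ (k + 1) + 1),
        f ^ (Ps.length / 2 ^ (k + 1)), f ^ (Ps.length / 2 ^ (k + 1) + 1))).1 =
      [valL Ps f g 0 0] := by
  induction k with
  | zero => simp [valL]
  | succ k ih =>
    rw [List.range_succ, List.reverse_append]
    simp only [List.reverse_singleton, List.singleton_append, List.foldl_cons]
    rw [show k + 1 + 1 = k + 2 from rfl, stepLoop]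
    exact ih

theorem compose_eq_Nval (Ps : List Int) (f g : Int) (hne : Ps ≠ []) :
    compose Ps f g = Nval f g Ps := by
  have hn1 : 1 ≤ Ps.length := List.length_pos_iff.mpr hne
  have hszp : Ps.length.size - 1 + 1 = Ps.length.size := by
    have := Nat.size_pos.mpr hn1; omega
  have hz : Ps.length / 2 ^ (Ps.length.size - 1 + 1) = 0 := by
    apply Nat.div_eq_of_lt; rw [hszp]; exact Nat.lt_size_self _
  have hm := mainLoop Ps f g (Ps.length.size - 1)
  rw [hz] at hm
  rw [pow_zero, pow_zero, zero_add, pow_one, pow_one] at hm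
  rw [show compose Ps f g = pyAt ((((List.range (Ps.length.size - 1)).reverse).foldl
        (Astep2 f g Ps.length)
        (((List.range (2 ^ (Ps.length.size - 1))).foldl
            (Astep1 Ps f g Ps.length (Ps.length.size - 1)) ([], 0)).1, 1, g, 1, f)).1) 0 from rfl]
  rw [firstLoop Ps f g hne _ (le_refl _)]
  rw [hm]
  rw [show pyAt [valL Ps f g 0 0] 0 = valL Ps f g 0 0 from rfl]
  rw [valL]
  rw [show offL Ps.length 0 0 = 0 from rfl,
      show sizeL Ps.length 0 0 = Ps.length by simp [sizeL, colorA]]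
  rw [List.drop_zero, List.take_length]

theorem Bfold (f g : Int) (pre suf : List Int) (hs : suf ≠ []) :
    pre.reverse.foldl (fun (s : Int × Int) c => (s.1 * f + c * (s.2 * g), s.2 * g))
      (Nval f g suf, g ^ (suf.length - 1)) =
      (Nval f g (pre ++ suf), g ^ ((pre ++ suf).length - 1)) := by
  induction pre with
  | nil => simp
  | cons a pre ih =>
    have hlen : (pre ++ suf).length - 1 + 1 = (pre ++ suf).length := by
      have : suf.length ≥ 1 := List.length_pos_iff.mpr hs
      simp [List.length_append]; omega
    rw [List.reverse_cons, List.foldl_append, ih, List.foldl_cons, List.foldl_nil]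
    have h1 : g ^ ((pre ++ suf).length - 1) * g = g ^ ((a :: pre ++ suf).length - 1) := by
      rw [← pow_succ, hlen]; simp
    refine Prod.ext ?_ h1
    show Nval f g (pre ++ suf) * f + a * (g ^ ((pre ++ suf).length - 1) * g) =
      Nval f g (a :: (pre ++ suf))
    rw [← pow_succ, hlen, Nval]
    ring

theorem compose_alt_eq_Nval (Ps : List Int) (f g : Int) (hne : Ps ≠ []) :
    compose_alt Ps f g = Nval f g Ps := by
  unfold compose_alt
  have hdec : Ps.dropLast ++ [Ps.getLast hne] = Ps := List.dropLast_append_getLast hne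
  have hget : (PySem.List.pyGet? Ps (-1)).getD 0 = Ps.getLast hne := by
    rw [PySem.List.pyGet?_neg_one, List.getLast?_eq_some_getLast hne]; rfl
  have h1 : Nval f g [Ps.getLast hne] = Ps.getLast hne := Nval_one f g _
  have h0 : g ^ (([Ps.getLast hne] : List Int).length - 1) = 1 := by simp
  have := Bfold f g Ps.dropLast [Ps.getLast hne] (by simp)
  rw [h1, h0, hdec] at this
  simp only [hget, this]

-- ===== VERDICT (by name: the statement is the Claim_ definition above) =====
theorem compose_spec : Claim_equal_compose := by
  intro Ps f g _ hpre
  unfold Spec_compose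
  rw [compose_eq_Nval Ps f g hpre, compose_alt_eq_Nval Ps f g hpre]
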